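-- pv_equiv track=rewrite | github.com/grey-ethics/thermofisher_form_filler | Downloaded_Documents/edited_01/cc_tag_assistant.py | nearest_heading_path
-- ===== SOURCE A (Python) =====
-- def nearest_heading_path(headings, pos):
--     """Given headings [(start, level, text)], find nearest previous H1..H3 at 'pos' and build path."""
--     h1 = h2 = h3 = None
--     # Walk through headings up to 'pos'
--     for start, lvl, text in headings:
--         if start > pos:
--             break
--         if lvl == 1:
--             h1, h2, h3 = text, None, None
--         elif lvl == 2:
--             h2, h3 = text, None
--         elif lvl == 3:
--             h3 = text
--     path = [h for h in (h1, h2, h3) if h]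
--     return path
-- ===== SOURCE B (Python) =====
-- def _last_at(seg, lvl):
--     """Index of the last entry of 'seg' with level 'lvl', or -1."""
--     for i in range(len(seg) - 1, -1, -1):
--         if seg[i][1] == lvl:
--             return i
--     return -1
--
--
-- def nearest_heading_path(headings, pos):
--     """Staged backward searches: last H1 in the prefix, last H2 after it, last H3 after that."""
--     prefix = []
--     for h in headings:
--         if h[0] > pos:
--             break
--         prefix.append(h)
--     i1 = _last_at(prefix, 1)
--     seg2 = prefix[i1 + 1:]
--     i2 = _last_at(seg2, 2)
--     seg3 = seg2[i2 + 1:]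
--     i3 = _last_at(seg3, 3)
--     h1 = prefix[i1][2] if i1 >= 0 else None
--     h2 = seg2[i2][2] if i2 >= 0 else None
--     h3 = seg3[i3][2] if i3 >= 0 else None
--     return [h for h in (h1, h2, h3) if h]
-- ===== Notes on version B (the rewrite author's own statement) =====
-- stated objective: alternative
-- what changed: Replaces A's single forward scan carrying (h1,h2,h3) reset state by three staged backward searches on the prefix before the first start>pos: the last H1, then the last H2 in the segment after it, then the last H3 in the segment after that.
import Mathlib
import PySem

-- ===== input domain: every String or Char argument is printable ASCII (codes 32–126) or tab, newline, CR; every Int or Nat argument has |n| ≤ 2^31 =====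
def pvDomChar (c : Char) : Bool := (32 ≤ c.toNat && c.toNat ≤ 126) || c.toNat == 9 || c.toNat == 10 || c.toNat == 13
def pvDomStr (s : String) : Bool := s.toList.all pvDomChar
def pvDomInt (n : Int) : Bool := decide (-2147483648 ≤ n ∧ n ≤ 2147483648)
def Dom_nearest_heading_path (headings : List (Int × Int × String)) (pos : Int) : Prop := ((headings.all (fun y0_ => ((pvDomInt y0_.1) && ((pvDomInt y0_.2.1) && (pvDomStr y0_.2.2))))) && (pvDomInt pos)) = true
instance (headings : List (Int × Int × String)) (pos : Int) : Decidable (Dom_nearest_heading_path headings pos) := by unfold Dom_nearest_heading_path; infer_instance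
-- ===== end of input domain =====

-- B replaces A's single forward scan with level-reset state by three staged backward
-- searches (last H1 in the prefix, last H2 after it, last H3 after that); same cost,
-- different decomposition.

-- ===== PORT A =====
-- the for-loop of A with its break, carrying the (h1,h2,h3) state
def nhpLoop (pos : Int) : List (Int × Int × String) →
    (Option String × Option String × Option String) →
    (Option String × Option String × Option String)
  | [], st => st
  | (s, l, t) :: rest, (h1, h2, h3) =>
    if s > pos then (h1, h2, h3)
    else if l = 1 then nhpLoop pos rest (some t, none, none)
    else if l = 2 then nhpLoop pos rest (h1, some t, none)
    else if l = 3 then nhpLoop pos rest (h1, h2, some t)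
    else nhpLoop pos rest (h1, h2, h3)

-- [h for h in (h1,h2,h3) if h]  (Python truthiness: drops None and "")
def nhpTruthy (hs : List (Option String)) : List String :=
  hs.filterMap (fun o => match o with
    | none => none
    | some t => if t = "" then none else some t)

def nearest_heading_path (headings : List (Int × Int × String)) (pos : Int) : List String :=
  let st := nhpLoop pos headings (none, none, none)
  nhpTruthy [st.1, st.2.1, st.2.2]

-- ===== PORT B =====
-- _last_at: index of the last entry with the given level, or -1 (B's backward range loop,
-- rendered as the structural recursion computing the same last index)
def nhpLastAt : List (Int × Int × String) → Int → Int
  | [], _ => -1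
  | e :: rest, lvl =>
    if 0 ≤ nhpLastAt rest lvl then nhpLastAt rest lvl + 1
    else if e.2.1 = lvl then 0 else -1

-- 'seg[i][2] if i >= 0 else None'
def nhpTextAt (seg : List (Int × Int × String)) (i : Int) : Option String :=
  if 0 ≤ i then (PySem.List.pyGet? seg i).map (fun e => e.2.2) else none

-- the prefix-building loop of B (append until the first start > pos)
def nhpPrefix (pos : Int) : List (Int × Int × String) → List (Int × Int × String)
  | [] => []
  | e :: rest => if e.1 > pos then [] else e :: nhpPrefix pos rest

def nearest_heading_path_alt (headings : List (Int × Int × String)) (pos : Int) : List String :=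
  let pre := nhpPrefix pos headings
  let i1 := nhpLastAt pre 1
  let seg2 := PySem.List.slice pre (some (i1 + 1)) none
  let i2 := nhpLastAt seg2 2
  let seg3 := PySem.List.slice seg2 (some (i2 + 1)) none
  let i3 := nhpLastAt seg3 3
  (([nhpTextAt pre i1, nhpTextAt seg2 i2, nhpTextAt seg3 i3].filterMap id).filter
    (fun t => t ≠ ""))

-- ===== PRECONDITION & SPEC =====
def Spec_nearest_heading_path (headings : List (Int × Int × String)) (pos : Int) (out : List String) : Prop := out = nearest_heading_path_alt headings pos
instance (headings : List (Int × Int × String)) (pos : Int) (out : List String) : Decidable (Spec_nearest_heading_path headings pos out) := by unfold Spec_nearest_heading_path; infer_instance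

-- ===== CLAIM =====
def Claim_equal_nearest_heading_path : Prop := ∀ (headings : List (Int × Int × String)) (pos : Int), Dom_nearest_heading_path headings pos → Spec_nearest_heading_path headings pos (nearest_heading_path headings pos)

-- ===== LEMMAS AND PROOFS =====

-- A's loop body, without the break (proofs only)
def nhpStep (st : Option String × Option String × Option String)
    (e : Int × Int × String) : Option String × Option String × Option String :=
  if e.2.1 = 1 then (some e.2.2, none, none)
  else if e.2.1 = 2 then (st.1, some e.2.2, none)
  else if e.2.1 = 3 then (st.1, st.2.1, some e.2.2)
  else st

theorem nhpLoop_eq_foldl (pos : Int) (L : List (Int × Int × String))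
    (st : Option String × Option String × Option String) :
    nhpLoop pos L st = (nhpPrefix pos L).foldl nhpStep st := by
  induction L generalizing st with
  | nil => rfl
  | cons e rest ih =>
    obtain ⟨s, l, t⟩ := e
    obtain ⟨h1, h2, h3⟩ := st
    by_cases hs : s > pos
    · simp [nhpLoop, nhpPrefix, hs]
    · by_cases hl1 : l = 1
      · simp [nhpLoop, nhpPrefix, nhpStep, hs, hl1, ih]
      · by_cases hl2 : l = 2
        · simp [nhpLoop, nhpPrefix, nhpStep, hs, hl1, hl2, ih]
        · by_cases hl3 : l = 3
          · simp [nhpLoop, nhpPrefix, nhpStep, hs, hl1, hl2, hl3, ih]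
          · simp [nhpLoop, nhpPrefix, nhpStep, hs, hl1, hl2, hl3, ih]

theorem nhpLastAt_bounds (L : List (Int × Int × String)) (v : Int) :
    -1 ≤ nhpLastAt L v ∧ nhpLastAt L v < (L.length : Int) := by
  induction L with
  | nil => simp [nhpLastAt]
  | cons e rest ih =>
    obtain ⟨ih1, ih2⟩ := ih
    simp only [nhpLastAt, List.length_cons]
    split_ifs <;> omega

theorem nhpLastAt_append (L : List (Int × Int × String)) (e : Int × Int × String) (v : Int) :
    nhpLastAt (L ++ [e]) v = if e.2.1 = v then (L.length : Int) else nhpLastAt L v := by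
  induction L with
  | nil => simp [nhpLastAt]
  | cons x rest ih =>
    obtain ⟨hb1, hb2⟩ := nhpLastAt_bounds rest v
    simp only [List.cons_append, nhpLastAt, ih, List.length_cons]
    by_cases hv : e.2.1 = v
    · simp only [if_pos hv]
      split_ifs <;> omega
    · simp only [if_neg hv]

theorem nhpTextAt_append (seg : List (Int × Int × String)) (e : Int × Int × String)
    (i : Int) (h : i < (seg.length : Int)) :
    nhpTextAt (seg ++ [e]) i = nhpTextAt seg i := by
  unfold nhpTextAt
  by_cases hi : 0 ≤ i
  · have hlt : i.toNat < seg.length := by omega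
    rw [PySem.List.pyGet?_of_nonneg _ hi, PySem.List.pyGet?_of_nonneg _ hi,
      List.getElem?_append_left hlt]
  · simp [hi]

theorem nhpTextAt_length (seg : List (Int × Int × String)) (e : Int × Int × String) :
    nhpTextAt (seg ++ [e]) (seg.length : Int) = some e.2.2 := by
  unfold nhpTextAt
  rw [if_pos (by positivity), PySem.List.pyGet?_append_length]
  rfl

theorem nhpDropApp (P : List (Int × Int × String)) (e : Int × Int × String) (n : ℕ)
    (h : n ≤ P.length) : (P ++ [e]).drop n = P.drop n ++ [e] :=
  List.drop_append_of_le_length h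

-- the segment after the last H1, resp. after the last H2 inside that (proofs only)
def nhpSeg2 (P : List (Int × Int × String)) : List (Int × Int × String) :=
  P.drop (nhpLastAt P 1 + 1).toNat

def nhpSeg3 (P : List (Int × Int × String)) : List (Int × Int × String) :=
  (nhpSeg2 P).drop (nhpLastAt (nhpSeg2 P) 2 + 1).toNat

-- the three staged backward searches, as a function of the prefix (proofs only)
def nhpCore (P : List (Int × Int × String)) :
    Option String × Option String × Option String :=
  (nhpTextAt P (nhpLastAt P 1),
   nhpTextAt (nhpSeg2 P) (nhpLastAt (nhpSeg2 P) 2),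
   nhpTextAt (nhpSeg3 P) (nhpLastAt (nhpSeg3 P) 3))

theorem nhpCore_eq_foldl (P : List (Int × Int × String)) :
    nhpCore P = P.foldl nhpStep (none, none, none) := by
  induction P using List.reverseRecOn with
  | nil => rfl
  | append_singleton P e ih =>
    rw [List.foldl_append, List.foldl_cons, List.foldl_nil, ← ih]
    obtain ⟨b1, b2⟩ := nhpLastAt_bounds P 1
    obtain ⟨c1, c2⟩ := nhpLastAt_bounds (nhpSeg2 P) 2
    obtain ⟨d1, d2⟩ := nhpLastAt_bounds (nhpSeg3 P) 3
    by_cases hl1 : e.2.1 = 1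
    · have s2 : nhpSeg2 (P ++ [e]) = [] := by
        unfold nhpSeg2
        rw [nhpLastAt_append, if_pos hl1]
        have h : ((P.length : Int) + 1).toNat = P.length + 1 := by omega
        rw [h]
        exact List.drop_of_length_le (by simp)
      have s3 : nhpSeg3 (P ++ [e]) = [] := by unfold nhpSeg3; rw [s2]; rfl
      unfold nhpCore
      rw [nhpLastAt_append, if_pos hl1, nhpTextAt_length, s2, s3]
      simp [nhpStep, hl1, nhpTextAt, nhpLastAt]
    · have s2 : nhpSeg2 (P ++ [e]) = nhpSeg2 P ++ [e] := by
        unfold nhpSeg2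
        rw [nhpLastAt_append, if_neg hl1]
        exact nhpDropApp _ _ _ (by omega)
      by_cases hl2 : e.2.1 = 2
      · have s3 : nhpSeg3 (P ++ [e]) = [] := by
          unfold nhpSeg3
          rw [s2, nhpLastAt_append, if_pos hl2]
          have h : (((nhpSeg2 P).length : Int) + 1).toNat = (nhpSeg2 P).length + 1 := by omega
          rw [h]
          exact List.drop_of_length_le (by simp)
        unfold nhpCore
        rw [nhpLastAt_append, if_neg hl1, nhpTextAt_append _ _ _ b2, s2,
          nhpLastAt_append, if_pos hl2, nhpTextAt_length, s3]
        simp [nhpStep, hl1, hl2, nhpTextAt, nhpLastAt]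
      · by_cases hl3 : e.2.1 = 3
        · have s3 : nhpSeg3 (P ++ [e]) = nhpSeg3 P ++ [e] := by
            unfold nhpSeg3
            rw [s2, nhpLastAt_append, if_neg hl2]
            exact nhpDropApp _ _ _ (by omega)
          unfold nhpCore
          rw [nhpLastAt_append, if_neg hl1, nhpTextAt_append _ _ _ b2, s2,
            nhpLastAt_append, if_neg hl2, nhpTextAt_append _ _ _ c2, s3,
            nhpLastAt_append, if_pos hl3, nhpTextAt_length]
          simp [nhpStep, hl1, hl2, hl3]
        · have s3 : nhpSeg3 (P ++ [e]) = nhpSeg3 P ++ [e] := by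
            unfold nhpSeg3
            rw [s2, nhpLastAt_append, if_neg hl2]
            exact nhpDropApp _ _ _ (by omega)
          unfold nhpCore
          rw [nhpLastAt_append, if_neg hl1, nhpTextAt_append _ _ _ b2, s2,
            nhpLastAt_append, if_neg hl2, nhpTextAt_append _ _ _ c2, s3,
            nhpLastAt_append, if_neg hl3, nhpTextAt_append _ _ _ d2]
          simp [nhpStep, hl1, hl2, hl3]

theorem nhpTruthy_eq_filter (hs : List (Option String)) :
    nhpTruthy hs = (hs.filterMap id).filter (fun t => t ≠ "") := by
  induction hs with
  | nil => rfl
  | cons o rest ih =>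
    cases o with
    | none => simp [nhpTruthy] at ih ⊢; exact ih
    | some t =>
      by_cases ht : t = "" <;> simp [nhpTruthy, List.filter_cons, ht] at ih ⊢ <;> exact ih

theorem nhpSliceEq (L : List (Int × Int × String)) (v : Int) :
    PySem.List.slice L (some (nhpLastAt L v + 1)) none = L.drop (nhpLastAt L v + 1).toNat := by
  have := nhpLastAt_bounds L v
  exact PySem.List.slice_from _ (by omega)

-- ===== VERDICT =====
theorem nearest_heading_path_spec : Claim_equal_nearest_heading_path := by
  intro headings pos _
  unfold Spec_nearest_heading_path nearest_heading_path nearest_heading_path_alt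
  simp only [nhpSliceEq]
  rw [nhpLoop_eq_foldl, ← nhpCore_eq_foldl, nhpTruthy_eq_filter]
  rfl
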